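-- pv_equiv track=rewrite | github.com/pypi-data/pypi-mirror-248 | packages/sodom/sodom-1.1.0.post1-py3-none-any.whl/sodom/partial.py | merge_attrs
-- ===== SOURCE A (Python) =====
-- def merge_attrs(left: dict[str, str], right: dict[str, str]) -> dict[str, str]:
--         result = dict(left)
--         for k, v in right.items():
--             result[k] = ' '.join(filter(
--                 bool,
--                 (
--                     left.get(k, ''),
--                     v,
--                 ),
--             ))
--         return result
-- ===== SOURCE B (Python) =====
-- def merge_attrs(left: dict[str, str], right: dict[str, str]) -> dict[str, str]:
--     # Group-by pass: flatten both dicts into one (key, value) stream, group the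
--     # values by key (first-seen key order), then join each group's non-empty
--     # parts with a space.
--     groups: dict[str, list[str]] = {}
--     for k, v in [*left.items(), *right.items()]:
--         groups.setdefault(k, []).append(v)
--     return {k: ' '.join(filter(bool, vs)) for k, vs in groups.items()}
-- ===== Notes on version B (the rewrite author's own statement) =====
-- stated objective: alternative
-- what changed: Replaces A's copy-left-then-overlay-right mutation loop by a group-by algorithm: flatten both dicts into one (key,value) stream, group values by key with setdefault/append, then join each group's non-empty parts in a final pass.
import Mathlib
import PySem

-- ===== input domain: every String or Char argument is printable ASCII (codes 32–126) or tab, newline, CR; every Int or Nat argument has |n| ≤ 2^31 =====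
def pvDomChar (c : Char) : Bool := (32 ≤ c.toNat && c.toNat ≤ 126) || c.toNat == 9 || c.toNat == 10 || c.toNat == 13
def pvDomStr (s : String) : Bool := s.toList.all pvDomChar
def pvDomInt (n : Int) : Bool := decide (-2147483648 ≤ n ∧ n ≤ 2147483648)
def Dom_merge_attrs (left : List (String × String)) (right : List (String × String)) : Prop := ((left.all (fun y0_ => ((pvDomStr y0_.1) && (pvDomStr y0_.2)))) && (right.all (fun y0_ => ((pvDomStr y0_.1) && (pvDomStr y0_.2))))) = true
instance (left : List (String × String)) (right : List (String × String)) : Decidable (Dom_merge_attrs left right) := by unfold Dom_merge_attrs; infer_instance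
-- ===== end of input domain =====

-- B replaces A's copy-left-then-overlay-right loop with a group-by: flatten both
-- dicts into one (key, value) stream, group values by key, join the non-empty
-- parts per group (objective: alternative decomposition, same cost).

-- ===== PORT A =====
-- result = dict(left); for k, v in right.items(): result[k] = ' '.join(filter(bool, (left.get(k,''), v)))
def merge_attrs (left : List (String × String)) (right : List (String × String)) : List (String × String) :=
  let L : PySem.Dict String String := PySem.Dict.ofList left
  let result : PySem.Dict String String :=
    (PySem.Dict.ofList right).items.foldl
      (fun r kv =>
        r.insert kv.1 (PySem.Str.join " " (([L.getD kv.1 "", kv.2]).filter (fun p => p ≠ ""))))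
      L
  result.items

-- ===== PORT B =====
-- groups = {}; for k, v in [*left.items(), *right.items()]: groups.setdefault(k, []).append(v)
--   (setdefault(k, []).append(v) = modify k [] (· ++ [v]));  then
-- {k: ' '.join(filter(bool, vs)) for k, vs in groups.items()}
def merge_attrs_alt (left : List (String × String)) (right : List (String × String)) : List (String × String) :=
  let groups : PySem.Dict String (List String) :=
    ((PySem.Dict.ofList left).items ++ (PySem.Dict.ofList right).items).foldl
      (fun g kv => g.modify kv.1 [] (· ++ [kv.2])) PySem.Dict.empty
  groups.items.map
    (fun kvs => (kvs.1, PySem.Str.join " " (kvs.2.filter (fun p => p ≠ ""))))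

-- ===== PRECONDITION & SPEC =====
def Spec_merge_attrs (left : List (String × String)) (right : List (String × String)) (out : List (String × String)) : Prop := out = merge_attrs_alt left right
instance (left : List (String × String)) (right : List (String × String)) (out : List (String × String)) : Decidable (Spec_merge_attrs left right out) := by unfold Spec_merge_attrs; infer_instance

-- ===== CLAIM (what is proved, stated in full; the proofs are below) =====
def Claim_equal_merge_attrs : Prop := ∀ (left : List (String × String)) (right : List (String × String)), Dom_merge_attrs left right → Spec_merge_attrs left right (merge_attrs left right)

-- ===== LEMMAS AND PROOFS =====

-- getD after an insert loop whose key never occurs in the loop's pairs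
theorem pv_getD_foldl_not_mem (l : List (String × String)) (d : PySem.Dict String String)
    (f : String → String → String) (k : String) (hk : k ∉ l.map (·.1)) :
    (l.foldl (fun r kv => r.insert kv.1 (f kv.1 kv.2)) d).getD k "" = d.getD k "" := by
  induction l generalizing d with
  | nil => rfl
  | cons p rest ih =>
    simp only [List.map_cons, List.mem_cons, not_or] at hk
    simp only [List.foldl_cons]
    rw [ih _ hk.2, PySem.Dict.getD_insert]
    simp [hk.1]

-- getD after an insert loop over pairs with distinct keys, at a key the loop carries
theorem pv_getD_foldl_mem (l : List (String × String)) (d : PySem.Dict String String)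
    (f : String → String → String) (k v : String)
    (hnd : (l.map (·.1)).Nodup) (hmem : (k, v) ∈ l) :
    (l.foldl (fun r kv => r.insert kv.1 (f kv.1 kv.2)) d).getD k "" = f k v := by
  induction l generalizing d with
  | nil => cases hmem
  | cons p rest ih =>
    simp only [List.map_cons, List.nodup_cons] at hnd
    rcases List.mem_cons.mp hmem with h | h
    · subst h
      simp only [List.foldl_cons]
      rw [pv_getD_foldl_not_mem rest _ f k hnd.1, PySem.Dict.getD_insert]
      simp
    · simp only [List.foldl_cons]
      exact ih _ hnd.2 h

-- the values a pair list with distinct keys carries at one key: [its value] or []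
theorem pv_filter_keys (l : List (String × String)) (k : String)
    (hnd : (l.map (·.1)).Nodup) :
    (l.filter (fun p => p.1 == k)).map (·.2)
      = if k ∈ l.map (·.1) then [(PySem.Dict.mk l).getD k ""] else [] := by
  induction l with
  | nil => rfl
  | cons p rest ih =>
    obtain ⟨a, b⟩ := p
    simp only [List.map_cons, List.nodup_cons] at hnd
    by_cases h : a = k
    · have hrest : rest.filter (fun q => q.1 == k) = [] := by
        apply List.filter_eq_nil_iff.mpr
        intro q hq hbq
        exact hnd.1 (h ▸ (eq_of_beq hbq) ▸ List.mem_map_of_mem hq)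
      simp [h, hrest, PySem.Dict.getD_eq_get?_getD, PySem.Dict.get?_mk_cons]
    · have hb : (a == k) = false := by simp [h]
      simp [hb, ih hnd.2, PySem.Dict.getD_eq_get?_getD, PySem.Dict.get?_mk_cons,
        Ne.symm h]
      by_cases hm : k ∈ rest.map (·.1) <;> simp [hm, Ne.symm h]

-- ' '.join of the non-empty members of [s] is s
theorem pv_join_filter_one (s : String) :
    PySem.Str.join " " (([s]).filter (fun p => p ≠ "")) = s := by
  by_cases h : s = ""
  · subst h; rfl
  · simp only [List.filter, ne_eq, h, not_false_eq_true, decide_true]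
    apply String.ext
    simp [PySem.Str.join, PySem.Chars.join_singleton]

-- B's result, characterised: a map over the deduplicated key union
theorem pv_alt_canon (left right : List (String × String)) :
    merge_attrs_alt left right
      = (PySem.List.dedup ((PySem.Dict.ofList left).keys ++ (PySem.Dict.ofList right).keys)).map
          (fun k => (k, PySem.Str.join " "
            ((((PySem.Dict.ofList left).items ++ (PySem.Dict.ofList right).items).filter
                (fun p => p.1 == k)).map (·.2) |>.filter (fun p => p ≠ "")))) := by
  show (((PySem.Dict.ofList left).items ++ (PySem.Dict.ofList right).items).foldl
      (fun g kv => g.modify kv.1 [] (· ++ [kv.2])) PySem.Dict.empty).items.map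
      (fun kvs => (kvs.1, PySem.Str.join " " (kvs.2.filter (fun p => p ≠ "")))) = _
  set L : PySem.Dict String String := PySem.Dict.ofList left with hL
  set R : PySem.Dict String String := PySem.Dict.ofList right with hR
  set groups : PySem.Dict String (List String) :=
    (L.items ++ R.items).foldl (fun g kv => g.modify kv.1 [] (· ++ [kv.2])) PySem.Dict.empty
    with hg
  have hnd : groups.keys.Nodup := by
    rw [hg]
    exact PySem.Dict.nodup_keys_foldl_modify_key (L.items ++ R.items) (·.1) []
      (fun _ kv => (· ++ [kv.2])) PySem.Dict.empty PySem.Dict.nodup_keys_empty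
  have hkeys : groups.keys = PySem.List.dedup (L.keys ++ R.keys) := by
    rw [hg]
    have := PySem.Dict.keys_foldl_modify_key (L.items ++ R.items) (·.1) []
      (fun _ kv => (· ++ [kv.2])) (PySem.Dict.empty (κ := String) (ν := List String))
    rw [this]
    simp only [PySem.Set.update, PySem.List.dedup_eq_ofList,
      PySem.Set.ofList_eq_foldl, PySem.Dict.keys, List.map_append, List.foldl_append]
    rfl
  have hget : ∀ k, groups.getD k []
      = ((L.items ++ R.items).filter (fun p => p.1 == k)).map (·.2) := by
    intro k
    rw [hg, PySem.Dict.getD_foldl_modify_append]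
    simp [PySem.Dict.getD_empty]
  rw [PySem.Dict.items_eq_map_keys groups hnd [], hkeys, List.map_map]
  apply List.map_congr_left
  intro k _
  simp [hget k]
  
-- ===== VERDICT (by name: the statement is the Claim_ definition above) =====
theorem merge_attrs_spec : Claim_equal_merge_attrs := by
  intro left right _
  show merge_attrs left right = merge_attrs_alt left right
  rw [pv_alt_canon]
  unfold merge_attrs
  set L : PySem.Dict String String := PySem.Dict.ofList left with hL
  set R : PySem.Dict String String := PySem.Dict.ofList right with hR
  set f : String → String → String :=
    fun k v => PySem.Str.join " " (([L.getD k "", v]).filter (fun p => p ≠ "")) with hf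
  have hLnd : L.keys.Nodup := PySem.Dict.nodup_keys_ofList left
  have hRnd : R.keys.Nodup := PySem.Dict.nodup_keys_ofList right
  set res : PySem.Dict String String :=
    R.items.foldl (fun r kv => r.insert kv.1 (f kv.1 kv.2)) L with hres
  have hkeys : res.keys = PySem.Set.update L.keys (R.items.map (·.1)) := by
    simpa using PySem.Dict.keys_foldl_insert_key R.items (·.1) (fun r kv => f kv.1 kv.2) L
  have hRkeys : R.items.map (·.1) = R.keys := rfl
  have hresnd : res.keys.Nodup :=
    PySem.Dict.nodup_keys_foldl_insert_key R.items (·.1) (fun r kv => f kv.1 kv.2) L hLnd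
  have hkeys' : res.keys = PySem.List.dedup (L.keys ++ R.keys) := by
    rw [hkeys, hRkeys, PySem.List.dedup_eq_ofList, PySem.Set.ofList_append,
      PySem.Set.ofList_eq_self_of_nodup _ hLnd]
  have hitems : res.items = res.keys.map (fun k => (k, res.getD k "")) :=
    PySem.Dict.items_eq_map_keys res hresnd ""
  rw [hitems, hkeys']
  apply List.map_congr_left
  intro k hk
  -- split the grouped values at k into the left part and the right part
  have hLf : (L.items.filter (fun p => p.1 == k)).map (·.2)
      = if k ∈ L.keys then [L.getD k ""] else [] := by
    have := pv_filter_keys L.items k hLnd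
    simpa using this
  have hRf : (R.items.filter (fun p => p.1 == k)).map (·.2)
      = if k ∈ R.keys then [R.getD k ""] else [] := by
    have := pv_filter_keys R.items k hRnd
    simpa using this
  have hsplit : ((L.items ++ R.items).filter (fun p => p.1 == k)).map (·.2)
      = ((if k ∈ L.keys then [L.getD k ""] else []) ++
         (if k ∈ R.keys then [R.getD k ""] else [])) := by
    rw [List.filter_append, List.map_append, hLf, hRf]
  rw [hsplit]
  by_cases hkr : k ∈ R.keys
  · -- k comes from right: the last write at k is f k (R's value at k)
    obtain ⟨⟨k', v⟩, hmem, hfst⟩ := List.mem_map.mp (show k ∈ R.items.map (·.1) from hRkeys ▸ hkr)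
    simp only at hfst; subst hfst
    have := pv_getD_foldl_mem R.items L f k' v (hRkeys ▸ hRnd) hmem
    rw [← hres] at this
    rw [this]
    have hv : R.getD k' "" = v := PySem.Dict.getD_of_mem_items R hmem hRnd ""
    rw [hf, hv]
    by_cases hkl : k' ∈ L.keys
    · simp [hkl, hkr]
    · have hL0 : L.getD k' "" = "" := by
        apply PySem.Dict.getD_of_not_contains
        by_contra hc
        exact hkl ((PySem.Dict.contains_iff_mem_keys _ _).mp (by simpa using hc))
      simp only [hkl, if_false, hkr, if_true, List.nil_append, hL0]
      simp [List.filter]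
  · -- k only from left: never rewritten, and right contributes nothing
    have hkl : k ∈ L.keys := by
      have hk' : k ∈ L.keys ∨ k ∈ R.keys := by
        simpa using (PySem.List.mem_dedup _ _).mp hk
      tauto
    have h1 : res.getD k "" = L.getD k "" := by
      have := pv_getD_foldl_not_mem R.items L f k (by rw [hRkeys]; exact hkr)
      rw [← hres] at this; exact this
    simp only [hkl, if_true, hkr, if_false, List.append_nil]
    rw [h1, pv_join_filter_one]
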